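-- pv_equiv track=rewrite | github.com/hello-world-was-taken/Competitive_Programming | week_12/dota2-senate.py | find_next_letter
-- ===== SOURCE A (Python) =====
-- def find_next_letter(letter, senate, index):
--     j = index + 1
--     while j < len(senate):
--         if senate[j] == letter:
--             return j
--         j += 1
--
--     for i,v in enumerate(senate):
--         if v == letter:
--             return i
--     return -1
-- ===== SOURCE B (Python) =====
-- def find_next_letter(letter, senate, index):
--     positions = [i for i, v in enumerate(senate) if v == letter]
--     if not positions:
--         return -1
--     # binary search for the first occurrence strictly after index
--     lo, hi = 0, len(positions)
--     while lo < hi: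
--         mid = (lo + hi) // 2
--         if positions[mid] > index:
--             hi = mid
--         else:
--             lo = mid + 1
--     return positions[lo] if lo < len(positions) else positions[0]
-- ===== Notes on version B (the rewrite author's own statement) =====
-- stated objective: alternative
-- what changed: Instead of A's two sequential scans (a while-walk from index+1 then a full enumerate scan), B precomputes the list of all occurrence positions of letter in one pass and binary-searches it for the first position strictly after index, falling back to the first occurrence.
-- intended difference: On inputs with -len(senate) <= index+1 < 0 where letter occurs in the wrapped tail senate[index+1:], A returns a negative Python index (e.g. -1, colliding with its own not-found sentinel) as an artefact of negative-index wraparound, while B returns the intended non-negative position of that/the first occurrence. — e.g. on find_next_letter("R", ["D", "R"], -2): A returns -1, B returns 1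
import Mathlib
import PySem

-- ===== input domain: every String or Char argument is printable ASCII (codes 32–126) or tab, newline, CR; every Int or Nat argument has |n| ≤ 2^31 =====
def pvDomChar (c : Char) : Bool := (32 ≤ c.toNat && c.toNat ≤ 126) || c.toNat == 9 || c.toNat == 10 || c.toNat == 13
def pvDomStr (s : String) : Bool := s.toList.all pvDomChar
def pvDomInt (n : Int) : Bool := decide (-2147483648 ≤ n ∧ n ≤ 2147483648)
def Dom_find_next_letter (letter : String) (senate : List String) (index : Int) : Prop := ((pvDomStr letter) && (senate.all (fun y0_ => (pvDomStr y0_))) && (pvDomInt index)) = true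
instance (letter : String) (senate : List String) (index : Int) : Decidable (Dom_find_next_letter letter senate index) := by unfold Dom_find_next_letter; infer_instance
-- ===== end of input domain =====

-- B replaces A's two sequential scans by precomputing the occurrence positions of letter and
-- binary-searching them for the first one after index (objective: alternative algorithm).

-- ===== PORT A =====
-- the 'while j < len(senate)' loop; some j = an early 'return j', none = loop fell through
def pvLoopA (letter : String) (senate : List String) (j : Int) : Option Int :=
  if _h : j < (senate.length : Int) then
    if PySem.List.pyGet? senate j = some letter then some j
    else pvLoopA letter senate (j + 1)
  else none
termination_by ((senate.length : Int) - j).toNat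
decreasing_by omega

-- the 'for i,v in enumerate(senate)' loop with final 'return -1'
def pvLoopA2 (letter : String) : List (Int × String) → Int
  | [] => -1
  | (i, v) :: rest => if v = letter then i else pvLoopA2 letter rest

def find_next_letter (letter : String) (senate : List String) (index : Int) : Int :=
  match pvLoopA letter senate (index + 1) with
  | some j => j
  | none => pvLoopA2 letter (PySem.List.enumerate senate)

-- ===== PORT B =====
-- the 'while lo < hi' binary-search loop of Source B (positions[mid] is always in range there,
-- so the total getD is exact)
def pvBisect (positions : List Int) (index : Int) (lo hi : Nat) : Nat :=
  if _h : lo < hi then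
    let mid := (lo + hi) / 2
    if positions.getD mid 0 > index then pvBisect positions index lo mid
    else pvBisect positions index (mid + 1) hi
  else lo
termination_by hi - lo
decreasing_by all_goals omega

def find_next_letter_alt (letter : String) (senate : List String) (index : Int) : Int :=
  let positions := ((PySem.List.enumerate senate).filter (fun p => p.2 == letter)).map Prod.fst
  if positions = [] then -1
  else
    let lo := pvBisect positions index 0 positions.length
    if lo < positions.length then positions.getD lo 0 else positions.getD 0 0

-- ===== PRECONDITION & SPEC =====
-- Pre_ excludes exactly the inputs on which A raises IndexError: those with index + 1 < -len(senate),
-- where A's first probe senate[index+1] is below Python's negative-wrap range.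
def Pre_find_next_letter (letter : String) (senate : List String) (index : Int) : Prop :=
  -(senate.length : Int) ≤ index + 1
instance (letter : String) (senate : List String) (index : Int) : Decidable (Pre_find_next_letter letter senate index) := by unfold Pre_find_next_letter; infer_instance

def pvWitness_find_next_letter : String × List String × Int := ("R", ["D", "R"], 0)

-- On inputs with -len(senate) ≤ index+1 < 0 where letter occurs in the wrapped tail senate[index+1:],
-- A returns a negative Python index (an artefact of negative-index wraparound, colliding with its own
-- -1 not-found sentinel), while B returns the intended non-negative position of an occurrence.
def D_find_next_letter (letter : String) (senate : List String) (index : Int) : Prop :=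
  index + 1 < 0 ∧ -(senate.length : Int) ≤ index + 1 ∧
    letter ∈ senate.drop ((senate.length : Int) + (index + 1)).toNat
instance (letter : String) (senate : List String) (index : Int) : Decidable (D_find_next_letter letter senate index) := by unfold D_find_next_letter; infer_instance

def Spec_find_next_letter (letter : String) (senate : List String) (index : Int) (out : Int) : Prop := ¬ D_find_next_letter letter senate index → out = find_next_letter_alt letter senate index
instance (letter : String) (senate : List String) (index : Int) (out : Int) : Decidable (Spec_find_next_letter letter senate index out) := by unfold Spec_find_next_letter; infer_instance

def pvDiffWitness_find_next_letter : String × List String × Int := ("R", ["D", "R"], -2)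
def pvDiffWitnessOut_find_next_letter : Int × Int := (-1, 1)

-- ===== CLAIM (what is proved, stated in full; the proofs are below) =====
def Claim_unchanged_find_next_letter : Prop := ∀ (letter : String) (senate : List String) (index : Int), Dom_find_next_letter letter senate index → Pre_find_next_letter letter senate index → Spec_find_next_letter letter senate index (find_next_letter letter senate index)
def Claim_changed_find_next_letter : Prop := Dom_find_next_letter (pvDiffWitness_find_next_letter.1) (pvDiffWitness_find_next_letter.2.1) (pvDiffWitness_find_next_letter.2.2) ∧ Pre_find_next_letter (pvDiffWitness_find_next_letter.1) (pvDiffWitness_find_next_letter.2.1) (pvDiffWitness_find_next_letter.2.2) ∧ D_find_next_letter (pvDiffWitness_find_next_letter.1) (pvDiffWitness_find_next_letter.2.1) (pvDiffWitness_find_next_letter.2.2) ∧ find_next_letter (pvDiffWitness_find_next_letter.1) (pvDiffWitness_find_next_letter.2.1) (pvDiffWitness_find_next_letter.2.2) = pvDiffWitnessOut_find_next_letter.1 ∧ find_next_letter_alt (pvDiffWitness_find_next_letter.1) (pvDiffWitness_find_next_letter.2.1) (pvDiffWitness_find_next_letter.2.2) = pvDiffWitnessOut_find_next_letter.2 ∧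 pvDiffWitnessOut_find_next_letter.1 ≠ pvDiffWitnessOut_find_next_letter.2
def Claim_exact_find_next_letter : Prop := ∀ (letter : String) (senate : List String) (index : Int), Dom_find_next_letter letter senate index → Pre_find_next_letter letter senate index → D_find_next_letter letter senate index → find_next_letter letter senate index ≠ find_next_letter_alt letter senate index

-- ===== LEMMAS AND PROOFS =====

-- the positions list of Source B, generalized over the enumerate start
def pvPos (letter : String) (s : List String) (k : Int) : List Int :=
  ((PySem.List.enumerate s k).filter (fun p => p.2 == letter)).map Prod.fst

lemma pvPos_head (letter : String) : ∀ (s : List String) (k : Int),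
    (pvPos letter s k).head? = (PySem.List.index? s letter).map (fun m => k + (m : Int)) := by
  intro s
  induction s with
  | nil =>
    intro k
    simp [pvPos, PySem.List.enumerate_nil, PySem.List.index?_eq_idxOf?]
  | cons x xs ih =>
    intro k
    by_cases hx : x = letter
    · rw [hx, PySem.List.index?_cons_self]
      simp [pvPos, PySem.List.enumerate_cons, List.filter_cons, hx]
    · rw [PySem.List.index?_cons_of_ne _ hx]
      have hstep : pvPos letter (x :: xs) k = pvPos letter xs (k + 1) := by
        simp [pvPos, PySem.List.enumerate_cons, List.filter_cons, hx]
      rw [hstep, ih (k + 1)]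
      cases PySem.List.index? xs letter <;> simp <;> push_cast <;> ring

lemma pvPos_sorted (letter : String) (s : List String) (k : Int) :
    (pvPos letter s k).Pairwise (· < ·) := by
  have h := PySem.List.pairwise_lt_enumerate (xs := s) (s := k)
  exact (h.filter _).map Prod.fst (fun a b hab => hab)

lemma pvPos_lb (letter : String) (s : List String) (k : Int) :
    ∀ x ∈ pvPos letter s k, k ≤ x := by
  intro x hx
  simp only [pvPos, List.mem_map, List.mem_filter] at hx
  obtain ⟨p, ⟨hp, _⟩, rfl⟩ := hx
  rw [PySem.List.mem_enumerate_iff] at hp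
  obtain ⟨j, hj, rfl⟩ := hp
  simp

lemma pvPos_ub (letter : String) (s : List String) (k : Int) :
    ∀ x ∈ pvPos letter s k, x < k + (s.length : Int) := by
  intro x hx
  simp only [pvPos, List.mem_map, List.mem_filter] at hx
  obtain ⟨p, ⟨hp, _⟩, rfl⟩ := hx
  rw [PySem.List.mem_enumerate_iff] at hp
  obtain ⟨j, hj, rfl⟩ := hp
  simp
  omega

lemma pvPos_split (letter : String) (s : List String) (t : Nat) :
    pvPos letter s 0 = pvPos letter (s.take t) 0 ++ pvPos letter (s.drop t) (((s.take t).length : Nat) : Int) := by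
  unfold pvPos
  conv_lhs => rw [← List.take_append_drop t s]
  rw [PySem.List.enumerate_append, List.filter_append, List.map_append]
  simp

lemma sorted_getD_mono (l : List Int) (hs : l.Pairwise (· < ·)) (i j : Nat)
    (hij : i ≤ j) (hj : j < l.length) : l.getD i 0 ≤ l.getD j 0 := by
  rcases Nat.eq_or_lt_of_le hij with rfl | hlt
  · exact le_refl _
  · have := List.pairwise_iff_getElem.mp hs i j (by omega) hj hlt
    rw [List.getD_eq_getElem l 0 (by omega), List.getD_eq_getElem l 0 hj]
    exact le_of_lt this

lemma pvBisect_spec (l : List Int) (index : Int) (hs : l.Pairwise (· < ·)) :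
    ∀ (fuel lo hi : Nat), hi - lo ≤ fuel → lo ≤ hi → hi ≤ l.length →
    (∀ i, i < lo → l.getD i 0 ≤ index) → (∀ i, hi ≤ i → i < l.length → index < l.getD i 0) →
    pvBisect l index lo hi ≤ l.length ∧
    (∀ i, i < pvBisect l index lo hi → l.getD i 0 ≤ index) ∧
    (∀ i, pvBisect l index lo hi ≤ i → i < l.length → index < l.getD i 0) := by
  intro fuel
  induction fuel with
  | zero =>
    intro lo hi hfuel hle hhi hlo hhi2
    have : ¬ lo < hi := by omega
    rw [pvBisect, dif_neg this]
    exact ⟨by omega, hlo, fun i h1 h2 => hhi2 i (by omega) h2⟩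
  | succ fuel ih =>
    intro lo hi hfuel hle hhi hlo hhi2
    rw [pvBisect]
    by_cases h : lo < hi
    · rw [dif_pos h]
      simp only [gt_iff_lt]
      have hmlt : (lo + hi) / 2 < hi := by omega
      have hmlo : lo ≤ (lo + hi) / 2 := by omega
      split_ifs with hc
      · exact ih lo ((lo + hi) / 2) (by omega) (by omega) (by omega) hlo
          (fun i h1 h2 => lt_of_lt_of_le hc (sorted_getD_mono l hs _ i h1 h2))
      · exact ih ((lo + hi) / 2 + 1) hi (by omega) (by omega) hhi
          (fun i h1 => by
            by_cases h2 : i < lo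
            · exact hlo i h2
            · exact le_trans (sorted_getD_mono l hs i ((lo + hi) / 2) (by omega) (by omega)) (by omega))
          hhi2
    · rw [dif_neg h]
      exact ⟨by omega, hlo, fun i h1 h2 => hhi2 i (by omega) h2⟩

lemma alt_out (letter : String) (senate : List String) (index : Int) (L1 L2 : List Int)
    (hsplit : pvPos letter senate 0 = L1 ++ L2)
    (h1 : ∀ x ∈ L1, x ≤ index) (h2 : ∀ x ∈ L2, index < x) :
    find_next_letter_alt letter senate index =
      match L2.head? with
      | some x => x
      | none =>
        match (pvPos letter senate 0).head? with
        | some y => y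
        | none => -1 := by
  have hP : ((PySem.List.enumerate senate).filter (fun p => p.2 == letter)).map Prod.fst
      = pvPos letter senate 0 := rfl
  unfold find_next_letter_alt
  rw [hP]
  by_cases hnil : pvPos letter senate 0 = []
  · rw [if_pos hnil]
    have : L2 = [] := by
      rcases List.append_eq_nil_iff.mp (hsplit ▸ hnil) with ⟨_, h⟩; exact h
    rw [this, hnil]
    rfl
  · rw [if_neg hnil]
    set l := pvPos letter senate 0 with hl
    obtain ⟨hr1, hr2, hr3⟩ := pvBisect_spec l index (pvPos_sorted letter senate 0)
      l.length 0 l.length (by omega) (by omega) (le_refl _)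
      (by omega) (by intro i h1' h2'; omega)
    set r := pvBisect l index 0 l.length with hrdef
    have hlen : l.length = L1.length + L2.length := by rw [hsplit]; simp
    have hreq : r = L1.length := by
      by_contra hne
      rcases Nat.lt_or_ge r L1.length with hlt | hge
      · -- l[r] ∈ L1 so ≤ index, but hr3 says index < l[r]
        have hrlen : r < l.length := by omega
        have hmem : l.getD r 0 ∈ L1 := by
          rw [List.getD_eq_getElem l 0 hrlen, List.getElem_of_eq hsplit hrlen,
              List.getElem_append_left hlt]
          exact List.getElem_mem _
        have := h1 _ hmem
        have := hr3 r (le_refl _) hrlen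
        omega
      · have hgt : L1.length < r := by omega
        have hlt2 : L1.length < l.length := by omega
        have hmem : l.getD L1.length 0 ∈ L2 := by
          rw [List.getD_eq_getElem l 0 hlt2, List.getElem_of_eq hsplit hlt2,
              List.getElem_append_right (le_refl _)]
          exact List.getElem_mem _
        have := h2 _ hmem
        have := hr2 L1.length hgt
        omega
    cases hL2 : L2 with
    | nil =>
      have hrl : r = l.length := by rw [hL2] at hlen; simp at hlen; omega
      rw [if_neg (by omega)]
      obtain ⟨y, t, hyt⟩ := List.exists_cons_of_ne_nil hnil
      rw [hyt]
      simp [List.getD]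
    | cons x t =>
      have hrl : r < l.length := by rw [hL2] at hlen; simp at hlen; omega
      rw [if_pos hrl]
      have hgx : l.getD r 0 = x := by
        rw [List.getD_eq_getElem l 0 hrl, List.getElem_of_eq hsplit hrl,
            List.getElem_append_right hreq.ge]
        simp [hL2, hreq]
      rw [hgx]
      simp

-- characterizations of A reused from the two loops
lemma pvLoopA_nonneg (letter : String) (senate : List String) :
    ∀ (k : Nat), pvLoopA letter senate (k : Int) =
      match PySem.List.index? (senate.drop k) letter with
      | some m => some ((k : Int) + (m : Int))
      | none => none := by
  intro k
  induction hd : senate.length - k generalizing k with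
  | zero =>
    rw [pvLoopA, List.drop_eq_nil_of_le (by omega), dif_neg (by exact_mod_cast (by omega : ¬ k < senate.length))]
    simp [PySem.List.index?]
  | succ d ih =>
    have hk : k < senate.length := by omega
    rw [pvLoopA, dif_pos (by exact_mod_cast hk), PySem.List.pyGet?_natCast,
        List.drop_eq_getElem_cons hk, List.getElem?_eq_getElem hk]
    by_cases hx : senate[k] = letter
    · rw [if_pos (by simp [hx]), hx, PySem.List.index?_cons_self]
      simp
    · rw [if_neg (by simp [hx]), PySem.List.index?_cons_of_ne _ hx]
      have hcast : ((k:Int) + 1) = ((k+1 : Nat) : Int) := by push_cast; ring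
      rw [hcast, ih (k+1) (by omega)]
      cases PySem.List.index? (senate.drop (k+1)) letter <;> simp <;> push_cast <;> ring

lemma pvLoopA_neg (letter : String) (senate : List String) :
    ∀ (k : Nat), 0 < k → k ≤ senate.length → pvLoopA letter senate (-(k : Int)) =
      match PySem.List.index? (senate.drop (senate.length - k)) letter with
      | some m => some (-(k : Int) + (m : Int))
      | none => pvLoopA letter senate 0 := by
  intro k
  induction k with
  | zero => omega
  | succ k ih =>
    intro _ hle
    have hk : senate.length - (k+1) < senate.length := by omega
    rw [pvLoopA, dif_pos (by push_cast; omega),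
        PySem.List.pyGet?_neg_natCast senate (k+1) (by omega) hle,
        List.drop_eq_getElem_cons hk, List.getElem?_eq_getElem hk]
    by_cases hx : senate[senate.length - (k+1)] = letter
    · rw [if_pos (by simp [hx]), hx, PySem.List.index?_cons_self]
      simp
    · rw [if_neg (by simp [hx]), PySem.List.index?_cons_of_ne _ hx]
      rcases Nat.eq_zero_or_pos k with hk0 | hkpos
      · subst hk0
        norm_num
        have hlen : senate.length - 1 + 1 = senate.length := by omega
        rw [hlen]
        simp [List.drop_length]
      · have hstep : (-(((k+1:Nat)):Int) + 1) = -((k:Nat):Int) := by push_cast; ring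
        rw [hstep, ih hkpos (by omega)]
        have hdrop : senate.length - (k+1) + 1 = senate.length - k := by omega
        rw [hdrop]
        cases PySem.List.index? (senate.drop (senate.length - k)) letter <;> simp <;> push_cast <;> ring

lemma pvLoopA2_gen (letter : String) (senate : List String) :
    ∀ (s : Int), pvLoopA2 letter (PySem.List.enumerate senate s) =
      match PySem.List.index? senate letter with
      | some m => s + (m : Int)
      | none => -1 := by
  induction senate with
  | nil => intro s; simp [PySem.List.enumerate_nil, pvLoopA2, PySem.List.index?]
  | cons x xs ih =>
    intro s
    rw [PySem.List.enumerate_cons]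
    show (if x = letter then s else pvLoopA2 letter (PySem.List.enumerate xs (s+1))) = _
    by_cases hx : x = letter
    · rw [if_pos hx, hx, PySem.List.index?_cons_self]; simp
    · rw [if_neg hx, PySem.List.index?_cons_of_ne _ hx, ih (s+1)]
      cases PySem.List.index? xs letter <;> simp <;> push_cast <;> ring

lemma pvLoopA_zero (letter : String) (senate : List String) :
    pvLoopA letter senate 0 =
      match PySem.List.index? senate letter with
      | some m => some ((m : Int))
      | none => none := by
  have h := pvLoopA_nonneg letter senate 0
  simp only [Nat.cast_zero, List.drop_zero, zero_add] at h
  exact h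

lemma pvLoopA2_senate (letter : String) (senate : List String) :
    pvLoopA2 letter (PySem.List.enumerate senate) =
      match PySem.List.index? senate letter with
      | some m => (m : Int)
      | none => -1 := by
  have h := pvLoopA2_gen letter senate 0
  simp only [zero_add] at h
  exact h

-- A's value as the first occurrence at/after a non-negative start, falling back to the global first occurrence
lemma A_out_nonneg (letter : String) (senate : List String) (index : Int) (h0 : 0 ≤ index + 1) :
    find_next_letter letter senate index =
      match PySem.List.index? (senate.drop (index + 1).toNat) letter with
      | some m => (index + 1) + (m : Int)
      | none =>
        match PySem.List.index? senate letter with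
        | some m => (m : Int)
        | none => -1 := by
  unfold find_next_letter
  have hL := pvLoopA_nonneg letter senate (index + 1).toNat
  rw [show (((index + 1).toNat : Nat) : Int) = index + 1 from by omega] at hL
  rw [hL]
  cases hidx : PySem.List.index? (senate.drop (index + 1).toNat) letter with
  | some m => rfl
  | none =>
    rw [pvLoopA2_senate]

-- B's value via alt_out with the split at a non-negative start
lemma pv_main_nonneg (letter : String) (senate : List String) (index : Int)
    (h0 : 0 ≤ index + 1) :
    find_next_letter letter senate index = find_next_letter_alt letter senate index := by
  have hsplit := pvPos_split letter senate (index + 1).toNat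
  have hB := alt_out letter senate index _ _ hsplit
    (by
      intro x hx
      have := pvPos_ub letter (senate.take (index + 1).toNat) 0 x hx
      have hlen : ((senate.take (index + 1).toNat).length : Int) ≤ index + 1 := by
        rw [List.length_take]
        push_cast
        omega
      omega)
    (by
      intro x hx
      have := pvPos_lb letter (senate.drop (index + 1).toNat) _ x hx
      by_cases hle : (index + 1).toNat ≤ senate.length
      · have hlen : ((senate.take (index + 1).toNat).length : Int) = index + 1 := by
          rw [List.length_take]
          push_cast
          omega
        omega
      · exfalso
        have : senate.drop (index + 1).toNat = [] := List.drop_eq_nil_of_le (by omega)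
        rw [this] at hx
        simp [pvPos, PySem.List.enumerate_nil] at hx)
  rw [hB, A_out_nonneg letter senate index h0]
  rw [pvPos_head]
  cases hidx : PySem.List.index? (senate.drop (index + 1).toNat) letter with
  | some m =>
    have hle : (index + 1).toNat ≤ senate.length := by
      by_contra hgt
      rw [List.drop_eq_nil_of_le (by omega)] at hidx
      simp [PySem.List.index?_eq_idxOf?] at hidx
    have hlen : ((senate.take (index + 1).toNat).length : Int) = index + 1 := by
      rw [List.length_take]
      push_cast
      omega
    rw [hlen]
    simp
  | none =>
    rw [pvPos_head]
    cases PySem.List.index? senate letter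
    · simp
    · simp

-- B's value when the start is negative: every position is after index, so B returns the global
-- first occurrence
lemma alt_out_neg (letter : String) (senate : List String) (index : Int) (hneg : index + 1 < 0) :
    find_next_letter_alt letter senate index =
      match PySem.List.index? senate letter with
      | some m => (m : Int)
      | none => -1 := by
  have hB := alt_out letter senate index [] (pvPos letter senate 0) (by simp)
    (by simp)
    (by
      intro x hx
      have := pvPos_lb letter senate 0 x hx
      omega)
  rw [hB, pvPos_head]
  cases PySem.List.index? senate letter <;> simp

theorem pv_main (letter : String) (senate : List String) (index : Int)
    (hpre : -(senate.length : Int) ≤ index + 1)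
    (hnd : ¬ D_find_next_letter letter senate index) :
    find_next_letter letter senate index = find_next_letter_alt letter senate index := by
  by_cases h0 : 0 ≤ index + 1
  · exact pv_main_nonneg letter senate index h0
  · have hneg : index + 1 < 0 := by omega
    have hk1 : 0 < (-(index + 1)).toNat := by omega
    have hk2 : (-(index + 1)).toNat ≤ senate.length := by omega
    have hnotin : letter ∉ senate.drop ((senate.length : Int) + (index + 1)).toNat := by
      intro hmem
      exact hnd ⟨hneg, hpre, hmem⟩
    have hdropeq : senate.length - (-(index + 1)).toNat = ((senate.length : Int) + (index + 1)).toNat := by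
      omega
    unfold find_next_letter
    rw [show index + 1 = -(((-(index + 1)).toNat : Nat) : Int) by omega,
        pvLoopA_neg letter senate _ hk1 hk2, hdropeq]
    rw [(PySem.List.index?_eq_none_iff _ _).mpr hnotin]
    rw [pvLoopA_zero]
    rw [alt_out_neg letter senate index hneg]
    cases hidx : PySem.List.index? senate letter with
    | some m => rfl
    | none =>
      rw [pvLoopA2_senate, hidx]

theorem pv_tight (letter : String) (senate : List String) (index : Int)
    (hpre : -(senate.length : Int) ≤ index + 1)
    (hd : D_find_next_letter letter senate index) :
    find_next_letter letter senate index ≠ find_next_letter_alt letter senate index := by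
  obtain ⟨hneg, -, hmem⟩ := hd
  have hk1 : 0 < (-(index + 1)).toNat := by omega
  have hk2 : (-(index + 1)).toNat ≤ senate.length := by omega
  have hdropeq : senate.length - (-(index + 1)).toNat = ((senate.length : Int) + (index + 1)).toNat := by
    omega
  -- A returns a negative index
  have hA : find_next_letter letter senate index < 0 := by
    unfold find_next_letter
    rw [show index + 1 = -(((-(index + 1)).toNat : Nat) : Int) by omega,
        pvLoopA_neg letter senate _ hk1 hk2, hdropeq]
    cases hidx : PySem.List.index? (senate.drop ((senate.length : Int) + (index + 1)).toNat) letter with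
    | none =>
      exact absurd ((PySem.List.index?_eq_none_iff _ _).mp hidx) (by simp [hmem])
    | some m =>
      obtain ⟨hmlt, -, -⟩ := PySem.List.getElem_of_index?_eq_some hidx
      rw [List.length_drop] at hmlt
      simp only []
      omega
  -- B returns a non-negative index
  have hmem2 : letter ∈ senate := List.drop_subset _ _ hmem
  have hB : 0 ≤ find_next_letter_alt letter senate index := by
    rw [alt_out_neg letter senate index (by omega)]
    cases hidx : PySem.List.index? senate letter with
    | none =>
      exact absurd ((PySem.List.index?_eq_none_iff _ _).mp hidx) (by simp [hmem2])
    | some m => simp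
  omega

-- ===== VERDICT (by name: the statements are the Claim_ definitions above) =====
theorem find_next_letter_spec : Claim_unchanged_find_next_letter := by
  intro letter senate index _hd hpre hnd
  exact pv_main letter senate index hpre hnd

theorem find_next_letter_changed : Claim_changed_find_next_letter := by
  unfold Claim_changed_find_next_letter
  refine ⟨by decide, by decide, by decide, ?_, ?_, by decide⟩
  · show find_next_letter "R" ["D", "R"] (-2) = -1
    rw [find_next_letter, pvLoopA]
    norm_num [PySem.List.pyGet?, PySem.List.pyIdx?]
  · show find_next_letter_alt "R" ["D", "R"] (-2) = 1
    rw [find_next_letter_alt]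
    have h : ((PySem.List.enumerate ["D", "R"]).filter (fun p => p.2 == "R")).map Prod.fst = [(1 : Int)] := by
      simp [PySem.List.enumerate]
    rw [h]
    norm_num
    rw [pvBisect]; norm_num
    rw [pvBisect]; norm_num

theorem find_next_letter_tight : Claim_exact_find_next_letter := by
  intro letter senate index _hd hpre hd
  exact pv_tight letter senate index hpre hd
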